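-- pv_equiv track=rewrite | github.com/AdamZhouSE/pythonHomework | Code/CodeRecords/2764/39160/312958.py | go
-- ===== SOURCE A (Python) =====
-- def go(n):
--     if n<12:
--         return n
--     else:
--         p=n//2
--         q=n//3
--         r=n//4
--         return max((go(p)+go(q)+go(r)),n)
-- ===== SOURCE B (Python) =====
-- def go(n):
--     memo = {}
--
--     def solve(m):
--         if m < 12:
--             return m
--         if m in memo:
--             return memo[m]
--         v = max(solve(m // 2) + solve(m // 3) + solve(m // 4), m)
--         memo[m] = v
--         return v
--
--     return solve(n)
-- ===== Notes on version B (the rewrite author's own statement) =====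
-- stated objective: faster
-- what changed: B memoizes the recursion in a dictionary so each distinct quotient n//(2^a*3^b*4^c) is computed once, instead of A's plain exponential three-way recursion.
import Mathlib
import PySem

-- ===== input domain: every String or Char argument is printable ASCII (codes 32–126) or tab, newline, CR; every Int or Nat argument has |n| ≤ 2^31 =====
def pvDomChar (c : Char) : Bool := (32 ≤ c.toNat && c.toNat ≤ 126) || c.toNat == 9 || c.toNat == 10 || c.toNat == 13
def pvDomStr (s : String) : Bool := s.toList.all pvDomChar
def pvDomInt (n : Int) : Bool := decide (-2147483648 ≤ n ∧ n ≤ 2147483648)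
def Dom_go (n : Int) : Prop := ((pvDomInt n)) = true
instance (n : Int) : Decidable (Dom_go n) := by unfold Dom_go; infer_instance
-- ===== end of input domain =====

-- B replaces A's plain exponential three-way recursion with dictionary-memoized recursion (faster: each distinct quotient is computed once).


-- ===== PORT A =====
-- fuel = totality guard only: fuel n.toNat is enough because each recursive call strictly
-- decreases n.toNat, and at fuel 0 the argument satisfies m.toNat = 0, i.e. m < 12, where
-- returning m is exactly Python's base case (see goFuel_lt/goFuel_congr below)
def goFuel : Nat → Int → Int
  | 0, n => n
  | (f+1), n =>
    if n < 12 then n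
    else
      let p := PySem.Int.floordiv n 2
      let q := PySem.Int.floordiv n 3
      let r := PySem.Int.floordiv n 4
      max (goFuel f p + goFuel f q + goFuel f r) n

def go (n : Int) : Int := goFuel n.toNat n

-- ===== PORT B =====
-- nested helper `solve` of Source B: returns (value, updated memo); same fuel-only totality guard
def goSolveF : Nat → Int → PySem.Dict Int Int → Int × PySem.Dict Int Int
  | 0, m, memo => (m, memo)
  | (f+1), m, memo =>
    if m < 12 then (m, memo)
    else
      match memo.get? m with
      | some v => (v, memo)
      | none =>
        let (a, memo1) := goSolveF f (PySem.Int.floordiv m 2) memo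
        let (b, memo2) := goSolveF f (PySem.Int.floordiv m 3) memo1
        let (c, memo3) := goSolveF f (PySem.Int.floordiv m 4) memo2
        let v := max (a + b + c) m
        (v, memo3.insert m v)

def go_alt (n : Int) : Int := (goSolveF n.toNat n PySem.Dict.empty).1

-- ===== PRECONDITION & SPEC =====
def Spec_go (n : Int) (out : Int) : Prop := out = go_alt n
instance (n : Int) (out : Int) : Decidable (Spec_go n out) := by unfold Spec_go; infer_instance

-- ===== CLAIM (what is proved, stated in full; the proofs are below) =====
def Claim_equal_go : Prop := ∀ (n : Int), Dom_go n → Spec_go n (go n)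

-- ===== LEMMAS AND PROOFS =====

theorem pv_fd2_lt (m : Int) (h : ¬ m < 12) : (PySem.Int.floordiv m 2).toNat < m.toNat := by
  rw [PySem.Int.floordiv_eq_ediv_of_pos (show (0:Int) < 2 by norm_num)]; omega

theorem pv_fd3_lt (m : Int) (h : ¬ m < 12) : (PySem.Int.floordiv m 3).toNat < m.toNat := by
  rw [PySem.Int.floordiv_eq_ediv_of_pos (show (0:Int) < 3 by norm_num)]; omega

theorem pv_fd4_lt (m : Int) (h : ¬ m < 12) : (PySem.Int.floordiv m 4).toNat < m.toNat := by
  rw [PySem.Int.floordiv_eq_ediv_of_pos (show (0:Int) < 4 by norm_num)]; omega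

theorem goFuel_lt (f : Nat) (m : Int) (h : m < 12) : goFuel f m = m := by
  cases f with
  | zero => rfl
  | succ f => rw [goFuel, if_pos h]

theorem goFuel_congr : ∀ (f1 f2 : Nat) (m : Int), m.toNat ≤ f1 → m.toNat ≤ f2 →
    goFuel f1 m = goFuel f2 m := by
  intro f1
  induction f1 with
  | zero =>
    intro f2 m h1 h2
    rw [show goFuel 0 m = m from rfl, goFuel_lt f2 m (by omega)]
  | succ f1 ih =>
    intro f2 m h1 h2
    by_cases hm : m < 12
    · rw [goFuel_lt _ m hm, goFuel_lt _ m hm]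
    · cases f2 with
      | zero => omega
      | succ f2 =>
        rw [goFuel, goFuel, if_neg hm, if_neg hm]
        dsimp only
        rw [ih f2 _ (by have := pv_fd2_lt m hm; omega) (by have := pv_fd2_lt m hm; omega),
            ih f2 _ (by have := pv_fd3_lt m hm; omega) (by have := pv_fd3_lt m hm; omega),
            ih f2 _ (by have := pv_fd4_lt m hm; omega) (by have := pv_fd4_lt m hm; omega)]

theorem go_eq_lt (m : Int) (h : m < 12) : go m = m := goFuel_lt _ m h

theorem go_eq_ge (m : Int) (h : ¬ m < 12) :
    go m = max (go (PySem.Int.floordiv m 2) + go (PySem.Int.floordiv m 3)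
                + go (PySem.Int.floordiv m 4)) m := by
  unfold go
  rw [show m.toNat = (m.toNat - 1) + 1 by omega, goFuel, if_neg h]
  dsimp only
  rw [goFuel_congr (m.toNat - 1) (PySem.Int.floordiv m 2).toNat _
        (by have := pv_fd2_lt m h; omega) le_rfl,
      goFuel_congr (m.toNat - 1) (PySem.Int.floordiv m 3).toNat _
        (by have := pv_fd3_lt m h; omega) le_rfl,
      goFuel_congr (m.toNat - 1) (PySem.Int.floordiv m 4).toNat _
        (by have := pv_fd4_lt m h; omega) le_rfl]

-- memo invariant: every cached value is the corresponding `go` value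
def GoInv (d : PySem.Dict Int Int) : Prop := ∀ k v, d.get? k = some v → v = go k

theorem goSolveF_correct : ∀ (f : Nat) (m : Int) (memo : PySem.Dict Int Int),
    m.toNat ≤ f → GoInv memo →
    (goSolveF f m memo).1 = go m ∧ GoInv (goSolveF f m memo).2 := by
  intro f
  induction f with
  | zero =>
    intro m memo hle hinv
    have hm : m < 12 := by omega
    rw [show goSolveF 0 m memo = (m, memo) from rfl, go_eq_lt m hm]
    exact ⟨rfl, hinv⟩
  | succ f ih =>
    intro m memo hle hinv
    by_cases hm : m < 12
    · rw [goSolveF, if_pos hm, go_eq_lt m hm]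
      exact ⟨rfl, hinv⟩
    · have hfd2 : (PySem.Int.floordiv m 2).toNat ≤ f := by have := pv_fd2_lt m hm; omega
      have hfd3 : (PySem.Int.floordiv m 3).toNat ≤ f := by have := pv_fd3_lt m hm; omega
      have hfd4 : (PySem.Int.floordiv m 4).toNat ≤ f := by have := pv_fd4_lt m hm; omega
      rw [goSolveF, if_neg hm]
      cases hget : memo.get? m with
      | some v =>
        exact ⟨hinv m v hget, hinv⟩
      | none =>
        obtain ⟨h1, hinv1⟩ := ih (PySem.Int.floordiv m 2) memo hfd2 hinv
        obtain ⟨h2, hinv2⟩ := ih (PySem.Int.floordiv m 3) _ hfd3 hinv1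
        obtain ⟨h3, hinv3⟩ := ih (PySem.Int.floordiv m 4) _ hfd4 hinv2
        rcases hE2 : goSolveF f (PySem.Int.floordiv m 2) memo with ⟨a, memo1⟩
        rw [hE2] at h1 hinv1 h2 hinv2 h3 hinv3
        rcases hE3 : goSolveF f (PySem.Int.floordiv m 3) memo1 with ⟨b, memo2⟩
        rw [hE3] at h2 hinv2 h3 hinv3
        rcases hE4 : goSolveF f (PySem.Int.floordiv m 4) memo2 with ⟨c, memo3⟩
        rw [hE4] at h3 hinv3
        simp only at h1 h2 h3 hinv1 hinv2 hinv3
        dsimp only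
        rw [hE3]; dsimp only
        rw [hE4]; dsimp only
        constructor
        · rw [go_eq_ge m hm, h1, h2, h3]
        · intro k v hkv
          by_cases hk : k = m
          · subst hk
            rw [PySem.Dict.get?_insert_self] at hkv
            have hv : max (a + b + c) k = v := Option.some.inj hkv
            rw [go_eq_ge k hm, ← hv, h1, h2, h3]
          · rw [PySem.Dict.get?_insert_of_ne _ _ hk] at hkv
            exact hinv3 k v hkv

-- ===== VERDICT (by name: the statement is the Claim_ definition above) =====
theorem go_spec : Claim_equal_go := by
  intro n _
  unfold Spec_go go_alt
  have hinv : GoInv PySem.Dict.empty := by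
    intro k v h
    simp [PySem.Dict.empty, PySem.Dict.get?] at h
  exact ((goSolveF_correct n.toNat n PySem.Dict.empty le_rfl hinv).1).symm
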